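-- pv_equiv track=rewrite | github.com/strataregula/strataregula | strataregula/core/compiler.py | _expand_with_template
-- ===== SOURCE A (Python) =====
-- from typing import Dict, List, Any, Optional, Tuple
--
-- def _expand_with_template(pattern: str, template: str, data_items: List[str], value: Any) -> Dict[str, Any]:
--     """Expand pattern using template and data items."""
--     result = {}
--
--     # Parse pattern to find wildcard positions
--     pattern_parts = pattern.split('.')
--     template_parts = template.split('.')
--
--     # Find wildcard indices
--     wildcard_indices = []
--     for i, part in enumerate(pattern_parts):
--         if part == '*':
--             wildcard_indices.append(i)
--
--     if not wildcard_indices: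
--         return {pattern: value}
--
--     # Generate combinations for multi-wildcard patterns
--     if len(wildcard_indices) == 1:
--         # Single wildcard - simple case
--         wildcard_idx = wildcard_indices[0]
--         for item in data_items:
--             expanded_parts = pattern_parts.copy()
--             expanded_parts[wildcard_idx] = item
--             expanded_key = '.'.join(expanded_parts)
--             result[expanded_key] = value
--     else:
--         # Multiple wildcards - generate all combinations
--         import itertools
--         for combination in itertools.product(data_items, repeat=len(wildcard_indices)):
--             expanded_parts = pattern_parts.copy()
--             for i, item in zip(wildcard_indices, combination):
--                 expanded_parts[i] = item
--             expanded_key = '.'.join(expanded_parts)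
--             result[expanded_key] = value
--
--     return result
-- ===== SOURCE B (Python) =====
-- from typing import Dict, List, Any
--
--
-- def _expand_with_template(pattern: str, template: str, data_items: List[str], value: Any) -> Dict[str, Any]:
--     """Expand pattern using template and data items (frontier-based expansion)."""
--     pattern_parts = pattern.split('.')
--     wildcard_indices = [i for i, part in enumerate(pattern_parts) if part == '*']
--
--     if not wildcard_indices:
--         return {pattern: value}
--
--     # Grow a frontier of partial expansions, one wildcard slot at a time.
--     frontier = [pattern_parts]
--     for idx in wildcard_indices:
--         new_frontier = []
--         for parts in frontier:
--             for item in data_items: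
--                 filled = parts.copy()
--                 filled[idx] = item
--                 new_frontier.append(filled)
--         frontier = new_frontier
--
--     result = {}
--     for parts in frontier:
--         result['.'.join(parts)] = value
--     return result
-- ===== Notes on version B (the rewrite author's own statement) =====
-- stated objective: alternative
-- what changed: Replaces the single/multi-wildcard branch split and itertools.product with one unified loop that grows a frontier of partial part-lists, filling one wildcard slot per round.
import Mathlib
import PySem

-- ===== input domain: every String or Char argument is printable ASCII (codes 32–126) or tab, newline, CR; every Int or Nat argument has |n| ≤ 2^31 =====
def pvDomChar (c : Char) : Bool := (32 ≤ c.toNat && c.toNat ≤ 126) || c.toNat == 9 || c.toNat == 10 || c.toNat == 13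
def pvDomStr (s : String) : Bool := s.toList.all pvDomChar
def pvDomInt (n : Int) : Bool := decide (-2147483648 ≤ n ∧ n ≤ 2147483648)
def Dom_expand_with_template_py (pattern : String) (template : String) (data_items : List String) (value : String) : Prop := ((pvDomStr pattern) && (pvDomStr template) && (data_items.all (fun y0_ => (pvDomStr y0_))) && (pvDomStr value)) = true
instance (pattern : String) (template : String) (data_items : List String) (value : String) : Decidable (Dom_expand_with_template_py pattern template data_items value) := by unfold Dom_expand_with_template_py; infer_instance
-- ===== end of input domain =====

-- B unifies the single/multi-wildcard cases with an iteratively grown frontier of partial expansions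
-- instead of branching and calling itertools.product; same cost, same result.

-- ===== PORT A =====
-- itertools.product(items, repeat=n) in itertools' order (first coordinate varies slowest)
def pvProdRep (items : List String) : Nat → List (List String)
  | 0 => [[]]
  | n + 1 => items.flatMap (fun x => (pvProdRep items n).map (fun c => x :: c))

def expand_with_template_py (pattern : String) (template : String) (data_items : List String) (value : String) : List (String × String) :=
  let pattern_parts := (PySem.Str.split? pattern ".").getD []
  let _template_parts := (PySem.Str.split? template ".").getD []
  -- .split(".") via split? (sep nonempty so always some); indices from enumerate start at 0, so .toNat is exact
  let wildcard_indices : List Int :=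
    (PySem.List.enumerate pattern_parts).foldl
      (fun acc p => if p.2 = "*" then acc ++ [p.1] else acc) []
  if wildcard_indices = [] then
    ((PySem.Dict.empty : PySem.Dict String String).insert pattern value).items
  else if wildcard_indices.length = 1 then
    let wildcard_idx := wildcard_indices.headI
    (data_items.foldl (fun (d : PySem.Dict String String) item =>
        let expanded_parts := pattern_parts.set wildcard_idx.toNat item
        d.insert (PySem.Str.join "." expanded_parts) value)
      PySem.Dict.empty).items
  else
    ((pvProdRep data_items wildcard_indices.length).foldl
      (fun (d : PySem.Dict String String) combination =>
        let expanded_parts := (wildcard_indices.zip combination).foldl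
          (fun ps p => ps.set p.1.toNat p.2) pattern_parts
        d.insert (PySem.Str.join "." expanded_parts) value)
      PySem.Dict.empty).items

-- ===== PORT B =====
def expand_with_template_py_alt (pattern : String) (template : String) (data_items : List String) (value : String) : List (String × String) :=
  let pattern_parts := (PySem.Str.split? pattern ".").getD []
  let wildcard_indices : List Int :=
    (PySem.List.enumerate pattern_parts).filterMap
      (fun p => if p.2 = "*" then some p.1 else none)
  if wildcard_indices = [] then
    [(pattern, value)]
  else
    let frontier := wildcard_indices.foldl
      (fun fr idx => fr.flatMap (fun parts => data_items.map (fun item => parts.set idx.toNat item)))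
      [pattern_parts]
    (frontier.foldl (fun (d : PySem.Dict String String) parts =>
        d.insert (PySem.Str.join "." parts) value)
      PySem.Dict.empty).items

-- ===== PRECONDITION & SPEC =====
def Spec_expand_with_template_py (pattern : String) (template : String) (data_items : List String) (value : String) (out : List (String × String)) : Prop := out = expand_with_template_py_alt pattern template data_items value
instance (pattern : String) (template : String) (data_items : List String) (value : String) (out : List (String × String)) : Decidable (Spec_expand_with_template_py pattern template data_items value out) := by unfold Spec_expand_with_template_py; infer_instance

-- ===== CLAIM (what is proved, stated in full; the proofs are below) =====
def Claim_equal_expand_with_template_py : Prop := ∀ (pattern : String) (template : String) (data_items : List String) (value : String), Dom_expand_with_template_py pattern template data_items value → Spec_expand_with_template_py pattern template data_items value (expand_with_template_py pattern template data_items value)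

-- ===== LEMMAS AND PROOFS =====


-- A's append-fold for wildcard indices equals B's filterMap comprehension.
theorem foldA_eq_filterMap (l : List (Int × String)) (acc : List Int) :
    l.foldl (fun acc p => if p.2 = "*" then acc ++ [p.1] else acc) acc
      = acc ++ l.filterMap (fun p => if p.2 = "*" then some p.1 else none) := by
  induction l generalizing acc with
  | nil => simp
  | cons h t ih => by_cases hb : h.2 = "*" <;> simp [hb, ih]

theorem flatMap_wrap_eq_map {α : Type} (l : List α) :
    List.flatMap (fun x => [[x]]) l = l.map (fun x => [x]) := by
  induction l with
  | nil => rfl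
  | cons a t ih => simp [ih]

-- B's frontier fold, started from any frontier F, enumerates exactly the product
-- combinations (in itertools' order) applied to every member of F.
theorem frontier_eq (items : List String) (idxs : List Int) (F : List (List String)) :
    idxs.foldl
      (fun fr idx => fr.flatMap (fun parts => items.map (fun item => parts.set idx.toNat item))) F
    = F.flatMap (fun parts =>
        (pvProdRep items idxs.length).map (fun comb =>
          (idxs.zip comb).foldl (fun ps p => ps.set p.1.toNat p.2) parts)) := by
  induction idxs generalizing F with
  | nil => simp [pvProdRep]
  | cons i is ih =>
    simp only [List.foldl_cons, ih, List.length_cons, pvProdRep]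
    simp [List.flatMap_map, List.map_flatMap, List.flatMap_assoc, Function.comp_def]

-- ===== VERDICT (by name: the statement is the Claim_ definition above) =====
theorem expand_with_template_py_spec : Claim_equal_expand_with_template_py := by
  intro pattern template data_items value _
  unfold Spec_expand_with_template_py expand_with_template_py expand_with_template_py_alt
  simp only [foldA_eq_filterMap, List.nil_append]
  cases hE : (PySem.List.enumerate ((PySem.Str.split? pattern ".").getD [])).filterMap
      (fun p => if p.2 = "*" then some p.1 else none) with
  | nil => simp [PySem.Dict.insert, PySem.Dict.empty]
  | cons i is =>
    cases is with
    | nil =>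
      rw [if_neg (by simp), if_pos (by simp), if_neg (by simp), frontier_eq]
      simp [pvProdRep, List.foldl_map, List.headI]
      rw [flatMap_wrap_eq_map, List.foldl_map]
      simp
    | cons j rest =>
      rw [if_neg (by simp), if_neg (by simp), if_neg (by simp), frontier_eq]
      simp [List.foldl_map]
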